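-- pv_equiv track=rewrite | github.com/VATSALVARSHNEY108/HackHub-Modified- | modules/hackathon_discovery.py | filter_by_prizes
-- ===== SOURCE A (Python) =====
-- def filter_by_prizes(data, min_prize, max_prize, has_prizes):
--     """Filter data by prize criteria"""
--     filtered = data.copy()
--
--     if has_prizes:
--         filtered = [item for item in filtered if item.get('prize_amount', 0) > 0]
--
--     if min_prize > 0:
--         filtered = [item for item in filtered if item.get('prize_amount', 0) >= min_prize]
--
--     if max_prize < 100000:
--         filtered = [item for item in filtered if item.get('prize_amount', 0) <= max_prize]
--
--     return filtered
-- ===== SOURCE B (Python) =====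
-- def filter_by_prizes(data, min_prize, max_prize, has_prizes):
--     """Filter data by prize criteria in a single pass."""
--     result = []
--     for item in data:
--         p = item.get('prize_amount', 0)
--         if (not has_prizes or p > 0) and (min_prize <= 0 or p >= min_prize) and (max_prize >= 100000 or p <= max_prize):
--             result.append(item)
--     return result
-- ===== Notes on version B (the rewrite author's own statement) =====
-- stated objective: simpler
-- what changed: Replaces the copy plus up to three separate filtering passes by one explicit loop that reads the prize amount once per item and applies all three guards together.
import Mathlib
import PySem

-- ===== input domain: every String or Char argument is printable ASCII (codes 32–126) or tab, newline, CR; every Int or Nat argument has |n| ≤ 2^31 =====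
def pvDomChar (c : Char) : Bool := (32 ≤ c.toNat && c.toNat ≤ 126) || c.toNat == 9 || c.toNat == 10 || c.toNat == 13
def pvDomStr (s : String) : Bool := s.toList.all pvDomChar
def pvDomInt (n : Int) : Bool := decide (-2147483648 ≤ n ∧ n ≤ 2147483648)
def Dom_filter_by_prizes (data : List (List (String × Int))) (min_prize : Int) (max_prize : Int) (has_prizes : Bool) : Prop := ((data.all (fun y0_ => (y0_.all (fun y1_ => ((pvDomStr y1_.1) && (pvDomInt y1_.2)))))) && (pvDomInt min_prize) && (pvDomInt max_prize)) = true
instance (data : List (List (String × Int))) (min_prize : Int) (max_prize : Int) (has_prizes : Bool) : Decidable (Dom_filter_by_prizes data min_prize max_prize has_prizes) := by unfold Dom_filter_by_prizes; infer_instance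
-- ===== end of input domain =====

-- header: B fuses A's copy + three conditional filtering passes into one single-pass loop reading the prize once; objective: simpler.
-- ===== PORT A =====
def pvPrize (item : List (String × Int)) : Int :=
  (PySem.Dict.mk item).getD "prize_amount" 0

def filter_by_prizes (data : List (List (String × Int))) (min_prize : Int) (max_prize : Int) (has_prizes : Bool) : List (List (String × Int)) :=
  let filtered := data
  let filtered := if has_prizes then
      filtered.filter (fun item => decide (0 < pvPrize item))
    else filtered
  let filtered := if min_prize > 0 then
      filtered.filter (fun item => decide (min_prize ≤ pvPrize item))
    else filtered
  let filtered := if max_prize < 100000 then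
      filtered.filter (fun item => decide (pvPrize item ≤ max_prize))
    else filtered
  filtered

-- ===== PORT B =====
def filter_by_prizes_alt (data : List (List (String × Int))) (min_prize : Int) (max_prize : Int) (has_prizes : Bool) : List (List (String × Int)) :=
  match data with
  | [] => []
  | item :: rest =>
    let p := pvPrize item
    if (!has_prizes || decide (0 < p)) && (decide (min_prize ≤ 0) || decide (min_prize ≤ p)) && (decide (100000 ≤ max_prize) || decide (p ≤ max_prize)) then
      item :: filter_by_prizes_alt rest min_prize max_prize has_prizes
    else
      filter_by_prizes_alt rest min_prize max_prize has_prizes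

-- ===== PRECONDITION & SPEC =====
def Spec_filter_by_prizes (data : List (List (String × Int))) (min_prize : Int) (max_prize : Int) (has_prizes : Bool) (out : List (List (String × Int))) : Prop := out = filter_by_prizes_alt data min_prize max_prize has_prizes
instance (data : List (List (String × Int))) (min_prize : Int) (max_prize : Int) (has_prizes : Bool) (out : List (List (String × Int))) : Decidable (Spec_filter_by_prizes data min_prize max_prize has_prizes out) := by unfold Spec_filter_by_prizes; infer_instance

-- ===== CLAIM (what is proved, stated in full; the proofs are below) =====
def Claim_equal_filter_by_prizes : Prop := ∀ (data : List (List (String × Int))) (min_prize : Int) (max_prize : Int) (has_prizes : Bool), Dom_filter_by_prizes data min_prize max_prize has_prizes → Spec_filter_by_prizes data min_prize max_prize has_prizes (filter_by_prizes data min_prize max_prize has_prizes)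

-- ===== LEMMAS AND PROOFS =====
theorem alt_eq_filter (data : List (List (String × Int))) (min_prize max_prize : Int) (has_prizes : Bool) :
    filter_by_prizes_alt data min_prize max_prize has_prizes =
      data.filter (fun item => (!has_prizes || decide (0 < pvPrize item)) && (decide (min_prize ≤ 0) || decide (min_prize ≤ pvPrize item)) && (decide (100000 ≤ max_prize) || decide (pvPrize item ≤ max_prize))) := by
  induction data with
  | nil => rfl
  | cons item rest ih =>
    simp only [filter_by_prizes_alt, List.filter_cons, ih]

theorem a_eq_filter (data : List (List (String × Int))) (min_prize max_prize : Int) (has_prizes : Bool) :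
    filter_by_prizes data min_prize max_prize has_prizes =
      data.filter (fun item => (!has_prizes || decide (0 < pvPrize item)) && (decide (min_prize ≤ 0) || decide (min_prize ≤ pvPrize item)) && (decide (100000 ≤ max_prize) || decide (pvPrize item ≤ max_prize))) := by
  unfold filter_by_prizes
  by_cases h1 : has_prizes <;>
  rcases lt_or_ge (0:Int) min_prize with h2 | h2 <;>
  rcases lt_or_ge max_prize (100000:Int) with h3 | h3
  · simp only [h1, gt_iff_lt, if_pos h2, if_pos h3, if_true, Bool.not_true, Bool.false_or,
      List.filter_filter]
    refine List.filter_congr fun x _ => ?_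
    simp only [decide_eq_false (show ¬ min_prize ≤ 0 by omega),
      decide_eq_false (show ¬ (100000:Int) ≤ max_prize by omega), Bool.false_or, Bool.and_assoc, Bool.and_comm, Bool.and_left_comm, Bool.true_and, Bool.and_true]
  · simp only [h1, gt_iff_lt, if_pos h2, if_neg (not_lt.mpr h3), if_true, Bool.not_true,
      Bool.false_or, List.filter_filter]
    refine List.filter_congr fun x _ => ?_
    simp only [decide_eq_false (show ¬ min_prize ≤ 0 by omega),
      decide_eq_true h3, Bool.false_or, Bool.true_or, Bool.and_true, Bool.and_comm, Bool.true_and, Bool.and_true]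
  · simp only [h1, gt_iff_lt, if_neg (not_lt.mpr h2), if_pos h3, if_true, Bool.not_true,
      Bool.false_or, List.filter_filter]
    refine List.filter_congr fun x _ => ?_
    simp only [decide_eq_true h2, decide_eq_false (show ¬ (100000:Int) ≤ max_prize by omega),
      Bool.true_or, Bool.false_or, Bool.true_and, Bool.and_true, Bool.and_assoc, Bool.and_comm, Bool.and_left_comm, Bool.true_and, Bool.and_true]
  · simp only [h1, gt_iff_lt, if_neg (not_lt.mpr h2), if_neg (not_lt.mpr h3), if_true,
      Bool.not_true, Bool.false_or]
    refine List.filter_congr fun x _ => ?_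
    simp only [decide_eq_true h2, decide_eq_true h3, Bool.true_or, Bool.and_true]
  · simp only [h1, gt_iff_lt, if_pos h2, if_pos h3, if_false, Bool.not_false, Bool.true_or,
      Bool.true_and, List.filter_filter]
    refine List.filter_congr fun x _ => ?_
    simp only [decide_eq_false (show ¬ min_prize ≤ 0 by omega),
      decide_eq_false (show ¬ (100000:Int) ≤ max_prize by omega), Bool.false_or, Bool.and_comm, Bool.true_and, Bool.and_true]
  · simp only [h1, gt_iff_lt, if_pos h2, if_neg (not_lt.mpr h3), if_false, Bool.not_false,
      Bool.true_or, Bool.true_and]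
    refine List.filter_congr fun x _ => ?_
    simp only [decide_eq_false (show ¬ min_prize ≤ 0 by omega), decide_eq_true h3,
      Bool.false_or, Bool.true_or, Bool.and_true, Bool.and_comm, Bool.true_and, Bool.and_true]
  · simp only [h1, gt_iff_lt, if_neg (not_lt.mpr h2), if_pos h3, if_false, Bool.not_false,
      Bool.true_or, Bool.true_and]
    refine List.filter_congr fun x _ => ?_
    simp only [decide_eq_true h2, decide_eq_false (show ¬ (100000:Int) ≤ max_prize by omega),
      Bool.true_or, Bool.false_or, Bool.true_and, Bool.and_comm, Bool.true_and, Bool.and_true]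
  · simp only [h1, gt_iff_lt, if_neg (not_lt.mpr h2), if_neg (not_lt.mpr h3), if_false]
    conv_lhs => rw [← List.filter_true (l := data)]
    refine List.filter_congr fun x _ => ?_
    simp only [h1, decide_eq_true h2, decide_eq_true h3, Bool.not_false, Bool.true_or,
      Bool.true_and, Bool.and_self]
-- ===== VERDICT (by name: the statement is the Claim_ definition above) =====
theorem filter_by_prizes_spec : Claim_equal_filter_by_prizes := by
  intro data min_prize max_prize has_prizes _
  unfold Spec_filter_by_prizes
  rw [a_eq_filter, alt_eq_filter]
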